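-- pv_equiv track=rewrite | github.com/AwfulSolution/Dastgah_Recognition | Dastgah_Classifier_v2/src/dastgah_v2/data.py | _splits_valid
-- ===== SOURCE A (Python) =====
-- from typing import Dict, List, Tuple
--
-- def _splits_valid(splits: Dict[str, List[int]], n_tracks: int) -> bool:
--     if set(splits.keys()) != {"train", "val", "test"}:
--         return False
--     all_idx: List[int] = []
--     for key in ("train", "val", "test"):
--         vals = splits[key]
--         if any((not isinstance(i, int)) or i < 0 or i >= n_tracks for i in vals):
--             return False
--         all_idx.extend(vals)
--     return len(all_idx) == n_tracks and len(set(all_idx)) == n_tracks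
-- ===== SOURCE B (Python) =====
-- from typing import Dict, List
--
-- def _splits_valid(splits: Dict[str, List[int]], n_tracks: int) -> bool:
--     if set(splits.keys()) != {"train", "val", "test"}:
--         return False
--     if n_tracks < 0:
--         return False
--     seen = [False] * n_tracks
--     for key in ("train", "val", "test"):
--         for i in splits[key]:
--             if not isinstance(i, int) or i < 0 or i >= n_tracks:
--                 return False
--             if seen[i]:
--                 return False
--             seen[i] = True
--     return all(seen)
-- ===== Notes on version B (the rewrite author's own statement) =====
-- stated objective: alternative
-- what changed: B replaces A's accumulate-all-indices-then-compare-lengths-against-set-size check with a positional boolean marker array: duplicates are rejected inline during the single scan and coverage is checked by all(seen), so no index list and no set of indices are ever built.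
import Mathlib
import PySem

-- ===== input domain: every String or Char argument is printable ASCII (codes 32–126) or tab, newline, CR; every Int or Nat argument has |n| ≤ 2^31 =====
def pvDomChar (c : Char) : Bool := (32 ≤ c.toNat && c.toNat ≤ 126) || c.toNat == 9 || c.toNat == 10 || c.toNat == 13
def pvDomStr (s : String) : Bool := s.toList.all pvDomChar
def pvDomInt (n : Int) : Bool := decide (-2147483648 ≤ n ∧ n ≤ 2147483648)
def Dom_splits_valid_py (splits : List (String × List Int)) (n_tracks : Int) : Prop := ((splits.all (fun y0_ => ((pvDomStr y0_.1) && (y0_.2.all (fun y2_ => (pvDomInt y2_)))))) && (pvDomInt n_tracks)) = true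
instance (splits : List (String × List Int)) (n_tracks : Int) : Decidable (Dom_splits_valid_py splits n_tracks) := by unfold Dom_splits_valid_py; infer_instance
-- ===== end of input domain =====

-- B validates with a positional boolean marker array (inline duplicate rejection + all(seen))
-- instead of A's accumulated index list whose length / set-size are compared at the end;
-- same cost, different algorithm ("alternative").

-- ===== PORT A =====
-- the key-set test set(splits.keys()) == {"train","val","test"}, shared verbatim by both Pythons
def svKeysOk (splits : List (String × List Int)) : Bool :=
  PySem.Set.equal (PySem.Set.ofList (PySem.Dict.mk splits).keys)
    (PySem.Set.ofList ["train", "val", "test"])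

-- the 'for key in (…)' loop of A: accumulates all_idx, early-returns False on a bad index
def svGoA (splits : List (String × List Int)) (n_tracks : Int) :
    List String → List Int → Bool
  | [], all_idx =>
      (PySem.List.len all_idx == n_tracks) &&
      (PySem.Set.len (PySem.Set.ofList all_idx) == n_tracks)
  | key :: keys, all_idx =>
      let vals := (PySem.Dict.mk splits).getD key []
      if vals.any (fun i => decide (i < 0) || decide (n_tracks ≤ i)) then false
      else svGoA splits n_tracks keys (all_idx ++ vals)

def splits_valid_py (splits : List (String × List Int)) (n_tracks : Int) : Bool :=
  if !svKeysOk splits then false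
  else svGoA splits n_tracks ["train", "val", "test"] []

-- ===== PORT B =====
-- inner 'for i in splits[key]' loop of B: none = early False return
def svMark (n_tracks : Int) : List Int → List Bool → Option (List Bool)
  | [], seen => some seen
  | i :: is, seen =>
      if i < 0 || n_tracks ≤ i then none
      else if seen.getD i.toNat false then none
      else svMark n_tracks is (seen.set i.toNat true)

-- outer 'for key in (…)' loop of B
def svMarkKeys (splits : List (String × List Int)) (n_tracks : Int) :
    List String → List Bool → Option (List Bool)
  | [], seen => some seen
  | key :: keys, seen =>
      match svMark n_tracks ((PySem.Dict.mk splits).getD key []) seen with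
      | none => none
      | some seen' => svMarkKeys splits n_tracks keys seen'

def splits_valid_py_alt (splits : List (String × List Int)) (n_tracks : Int) : Bool :=
  if !svKeysOk splits then false
  else if n_tracks < 0 then false
  else
    match svMarkKeys splits n_tracks ["train", "val", "test"]
        (List.replicate n_tracks.toNat false) with
    | none => false
    | some seen => seen.all id

-- ===== PRECONDITION & SPEC =====
def Spec_splits_valid_py (splits : List (String × List Int)) (n_tracks : Int) (out : Bool) : Prop := out = splits_valid_py_alt splits n_tracks
instance (splits : List (String × List Int)) (n_tracks : Int) (out : Bool) : Decidable (Spec_splits_valid_py splits n_tracks out) := by unfold Spec_splits_valid_py; infer_instance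

-- ===== CLAIM (what is proved, stated in full; the proofs are below) =====
def Claim_equal_splits_valid_py : Prop := ∀ (splits : List (String × List Int)) (n_tracks : Int), Dom_splits_valid_py splits n_tracks → Spec_splits_valid_py splits n_tracks (splits_valid_py splits n_tracks)

-- ===== LEMMAS AND PROOFS =====

-- dedup strictly shrinks a list with duplicates
theorem sv_len_ofList_lt {α : Type} [BEq α] [LawfulBEq α] (xs : List α)
    (h : ¬ xs.Nodup) : (PySem.Set.ofList xs).length < xs.length := by
  induction xs with
  | nil => simp at h
  | cons x xs ih =>
    rw [PySem.Set.ofList_cons]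
    by_cases hx : xs.Nodup
    · have hmem : x ∈ xs := by
        by_contra hm
        exact h (List.nodup_cons.mpr ⟨hm, hx⟩)
      rw [PySem.Set.ofList_eq_self_of_nodup _ hx]
      have : ((PySem.Set.discard xs x).length) < xs.length := by
        simp only [PySem.Set.discard]
        refine List.length_filter_lt_length_iff_exists.mpr ⟨x, hmem, by simp⟩
      simp only [List.length_cons]
      omega
    · have h1 := ih hx
      have h2 : (PySem.Set.discard (PySem.Set.ofList xs) x).length ≤ (PySem.Set.ofList xs).length := by
        simp only [PySem.Set.discard]
        exact List.length_filter_le _ _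
      simp only [List.length_cons]
      omega

-- A's tail returns false once the accumulator already has a duplicate
theorem svGoA_false_of_dup (splits : List (String × List Int)) (n : Int)
    (ks : List String) (acc : List Int) (h : ¬ acc.Nodup) :
    svGoA splits n ks acc = false := by
  induction ks generalizing acc with
  | nil =>
    have hlt := sv_len_ofList_lt acc h
    show ((PySem.List.len acc == n) && (PySem.Set.len (PySem.Set.ofList acc) == n)) = false
    simp only [PySem.Set.len, PySem.List.len, Bool.and_eq_false_iff,
      beq_eq_false_iff_ne, ne_eq]
    omega
  | cons key ks ih =>
    show (if _ then false else svGoA splits n ks _) = false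
    split
    · rfl
    · exact ih _ (fun hnd => h hnd.of_append_left)

-- B's inner loop returns none whenever some value is out of range
theorem svMark_none_of_bad (n : Int) (vals : List Int) (seen : List Bool)
    (h : ∃ i ∈ vals, i < 0 ∨ n ≤ i) : svMark n vals seen = none := by
  induction vals generalizing seen with
  | nil => simp at h
  | cons i is ih =>
    show (if _ then none else if _ then none else svMark n is _) = none
    split
    · rfl
    · rename_i hg
      split
      · rfl
      · rcases h with ⟨j, hj, hbad⟩
        rcases List.mem_cons.mp hj with rfl | hj
        · exfalso
          apply hg
          rcases hbad with hb | hb <;> simp [hb]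
        · exact ih _ ⟨j, hj, hbad⟩

-- the marker-array invariant through one inner loop
theorem svMark_invariant (n : Int) (vals : List Int) (acc : List Int) (seen : List Bool)
    (hlen : seen.length = n.toNat)
    (hinv : ∀ j : Nat, j < seen.length → seen.getD j false = decide ((j : Int) ∈ acc))
    (hnd : acc.Nodup) (hvals : ∀ i ∈ vals, 0 ≤ i ∧ i < n) :
    (svMark n vals seen = none → ¬ (acc ++ vals).Nodup) ∧
    (∀ seen', svMark n vals seen = some seen' →
      seen'.length = n.toNat ∧
      (∀ j : Nat, j < seen'.length → seen'.getD j false = decide ((j : Int) ∈ acc ++ vals)) ∧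
      (acc ++ vals).Nodup) := by
  induction vals generalizing acc seen with
  | nil =>
    constructor
    · intro h; cases h
    · intro seen' hs
      have : seen' = seen := (Option.some.inj hs).symm
      subst this
      exact ⟨hlen, by simpa using hinv, by simpa using hnd⟩
  | cons i is ih =>
    obtain ⟨hi0, hin⟩ := hvals i (List.mem_cons_self ..)
    have hkl : i.toNat < seen.length := by omega
    have hred : svMark n (i :: is) seen =
        if seen.getD i.toNat false then none else svMark n is (seen.set i.toNat true) := by
      show (if _ then none else _) = _
      rw [if_neg (by simp; omega)]
    have hcast : ((i.toNat : Nat) : Int) = i := by omega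
    have hseen : seen.getD i.toNat false = decide (i ∈ acc) := by
      rw [hinv _ hkl, hcast]
    by_cases hmem : i ∈ acc
    · rw [hred, hseen, if_pos (by simp [hmem])]
      constructor
      · intro _ hnodup
        rcases List.nodup_append.mp hnodup with ⟨_, _, hdisj⟩
        exact hdisj i hmem i (List.mem_cons_self ..) rfl
      · intro seen' h; cases h
    · rw [hred, hseen, if_neg (by simp [hmem])]
      have hinv' : ∀ j : Nat, j < (seen.set i.toNat true).length →
          (seen.set i.toNat true).getD j false = decide ((j : Int) ∈ acc ++ [i]) := by
        intro j hj
        simp only [List.length_set] at hj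
        by_cases hji : j = i.toNat
        · subst hji
          rw [List.getD_eq_getElem?_getD, List.getElem?_set_self hkl]
          simp [hcast]
        · rw [List.getD_eq_getElem?_getD, List.getElem?_set_ne (by omega),
            ← List.getD_eq_getElem?_getD, hinv _ hj]
          have : ¬ ((j : Int) = i) := by omega
          simp [List.mem_append, this]
      have hnd' : (acc ++ [i]).Nodup := by
        simp only [List.nodup_append, hnd, List.nodup_cons, List.not_mem_nil,
          not_false_eq_true, List.nodup_nil, and_self, true_and]
        intro a ha b hb
        rcases List.mem_singleton.mp hb with rfl
        intro h
        exact hmem (h ▸ ha)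
      have := ih (acc ++ [i]) (seen.set i.toNat true) (by simp [hlen]) hinv' hnd'
        (fun j hj => hvals j (List.mem_cons_of_mem _ hj))
      simpa using this

-- counting: a duplicate-free list of ints in [0, n) has length n iff it covers [0, n)
theorem sv_count (n : Int) (hn : 0 ≤ n) (acc : List Int) (hnd : acc.Nodup)
    (hrange : ∀ i ∈ acc, 0 ≤ i ∧ i < n) :
    ((acc.length : Int) = n ↔ ∀ j : Nat, j < n.toNat → (j : Int) ∈ acc) := by
  set accN : List Nat := acc.map Int.toNat with haccN
  have hndN : accN.Nodup := by
    refine hnd.map_on ?_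
    intro x hx y hy hxy
    have := (hrange x hx).1
    have := (hrange y hy).1
    omega
  have hmemN : ∀ j : Nat, (j ∈ accN ↔ (j : Int) ∈ acc) := by
    intro j
    constructor
    · intro hj
      rcases List.mem_map.mp hj with ⟨i, hi, rfl⟩
      have := (hrange i hi).1
      have : ((i.toNat : Nat) : Int) = i := by omega
      rwa [this]
    · intro hj
      exact List.mem_map.mpr ⟨(j : Int), hj, by simp⟩
  have hsub : accN.toFinset ⊆ Finset.range n.toNat := by
    intro j hj
    simp only [List.mem_toFinset] at hj
    rcases List.mem_map.mp hj with ⟨i, hi, rfl⟩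
    have h1 := (hrange i hi).1
    have h2 := (hrange i hi).2
    simp only [Finset.mem_range]
    omega
  have hcard : accN.toFinset.card = acc.length := by
    rw [List.toFinset_card_of_nodup hndN, List.length_map]
  constructor
  · intro hlen j hj
    have : accN.toFinset = Finset.range n.toNat := by
      apply Finset.eq_of_subset_of_card_le hsub
      rw [hcard, Finset.card_range]
      omega
    have : j ∈ accN.toFinset := by
      rw [this]; simpa using hj
    exact (hmemN j).mp (List.mem_toFinset.mp this)
  · intro hall
    have hsub2 : Finset.range n.toNat ⊆ accN.toFinset := by
      intro j hj
      simp only [Finset.mem_range] at hj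
      exact List.mem_toFinset.mpr ((hmemN j).mpr (hall j hj))
    have := Finset.Subset.antisymm hsub hsub2
    have : accN.toFinset.card = n.toNat := by rw [this, Finset.card_range]
    omega

-- the two loops agree under the invariant
theorem svGoA_eq_mark (splits : List (String × List Int)) (n : Int) (hn : 0 ≤ n)
    (ks : List String) (acc : List Int) (seen : List Bool)
    (hlen : seen.length = n.toNat)
    (hinv : ∀ j : Nat, j < seen.length → seen.getD j false = decide ((j : Int) ∈ acc))
    (hnd : acc.Nodup) (hrange : ∀ i ∈ acc, 0 ≤ i ∧ i < n) :
    svGoA splits n ks acc =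
      (match svMarkKeys splits n ks seen with
       | none => false
       | some seen' => seen'.all id) := by
  induction ks generalizing acc seen with
  | nil =>
    show ((PySem.List.len acc == n) && (PySem.Set.len (PySem.Set.ofList acc) == n))
        = seen.all id
    rw [PySem.Set.ofList_eq_self_of_nodup _ hnd]
    have hall : seen.all id = true ↔ ∀ j : Nat, j < n.toNat → (j : Int) ∈ acc := by
      rw [List.all_eq_true]
      constructor
      · intro h j hj
        have hj' : j < seen.length := by omega
        have hgd : seen.getD j false = true := by
          rw [List.getD_eq_getElem?_getD, List.getElem?_eq_getElem hj']
          simpa using h _ (List.getElem_mem hj')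
        rw [hinv j hj'] at hgd
        simpa using hgd
      · intro h b hb
        rcases List.mem_iff_getElem.mp hb with ⟨j, hj, rfl⟩
        have hgd := hinv j hj
        rw [List.getD_eq_getElem?_getD, List.getElem?_eq_getElem hj] at hgd
        simp only [Option.getD_some] at hgd
        simp [hgd, h j (by omega)]
    rw [Bool.eq_iff_iff, hall]
    simp only [PySem.Set.len, PySem.List.len, Bool.and_eq_true, beq_iff_eq, and_self]
    exact sv_count n hn acc hnd hrange
  | cons key ks ih =>
    show (if _ then false else svGoA splits n ks (acc ++ (PySem.Dict.mk splits).getD key []))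
        = _
    cases hany : ((PySem.Dict.mk splits).getD key []).any
        (fun i => decide (i < 0) || decide (n ≤ i)) with
    | true =>
      rw [if_pos rfl]
      rcases List.any_eq_true.mp hany with ⟨i, hi, hbad⟩
      have hnone := svMark_none_of_bad n _ seen ⟨i, hi, by simpa using hbad⟩
      show false = _
      simp only [svMarkKeys]
      rw [hnone]
    | false =>
      rw [if_neg (by simp)]
      have hvr : ∀ i ∈ (PySem.Dict.mk splits).getD key [], 0 ≤ i ∧ i < n := by
        intro i hi
        have := List.any_eq_false.mp hany i hi
        simp only [Bool.or_eq_true, decide_eq_true_eq] at this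
        omega
      have hInv := svMark_invariant n _ acc seen hlen hinv hnd hvr
      cases hm : svMark n ((PySem.Dict.mk splits).getD key []) seen with
      | none =>
        rw [svGoA_false_of_dup splits n ks _ (hInv.1 hm)]
        simp only [svMarkKeys]
        rw [hm]
      | some seen' =>
        obtain ⟨hlen', hinv', hnd'⟩ := hInv.2 seen' hm
        have hrange' : ∀ i ∈ acc ++ (PySem.Dict.mk splits).getD key [], 0 ≤ i ∧ i < n := by
          intro i hi
          rcases List.mem_append.mp hi with h | h
          · exact hrange i h
          · exact hvr i h
        simp only [svMarkKeys]
        rw [hm]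
        exact ih (acc ++ _) seen' hlen' hinv' hnd' hrange' 

-- negative n_tracks: A's loop returns false from the empty accumulator
theorem svGoA_false_of_neg (splits : List (String × List Int)) (n : Int) (hn : n < 0)
    (ks : List String) : svGoA splits n ks [] = false := by
  induction ks with
  | nil =>
    show ((PySem.List.len ([] : List Int) == n) && _) = false
    simp only [PySem.List.len_eq, List.length_nil, Bool.and_eq_false_iff,
      beq_eq_false_iff_ne, ne_eq]
    omega
  | cons key ks ih =>
    show (if _ then false else svGoA splits n ks _) = false
    cases hv : (PySem.Dict.mk splits).getD key [] with
    | nil => simpa [hv] using ih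
    | cons v vs =>
      rw [if_pos]
      simp only [List.any_cons, Bool.or_eq_true, decide_eq_true_eq]
      left
      omega

-- ===== VERDICT (by name: the statement is the Claim_ definition above) =====
theorem splits_valid_py_spec : Claim_equal_splits_valid_py := by
  intro splits n _
  unfold Spec_splits_valid_py splits_valid_py splits_valid_py_alt
  cases hk : svKeysOk splits with
  | false => simp
  | true =>
    simp only [Bool.not_true, Bool.false_eq_true, if_false]
    by_cases hn : n < 0
    · rw [if_pos hn, svGoA_false_of_neg splits n hn]
    · rw [if_neg hn]
      exact svGoA_eq_mark splits n (by omega) _ [] (List.replicate n.toNat false)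
        (by simp)
        (by
          intro j hj
          simp only [List.length_replicate] at hj
          simp [List.getD_eq_getElem?_getD, hj])
        (by simp) (by simp)
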